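-- pv_equiv track=rewrite | github.com/leeminsun1205/CS_UIT | 2024-2025_S1/Machine Learning/Wecode/week2/bai2.py | process_R
-- ===== SOURCE A (Python) =====
-- def del_zero(row):
--     return [i for i in row if i != 0]
--
-- def process_R(arr):
--     new_arr = []
--     for row in arr:
--         new_row = del_zero(row)
--         if (len(row)!=0):
--             for i in range(len(new_row)-1, 0, -1):
--                 if new_row[i] == new_row[i-1]:
--                     new_row[i] *= 2
--                     new_row[i-1] = 0
--             new_row = del_zero(new_row)
--             row = [0] * (4 - len(new_row)) + new_row
--             new_arr.append(row)
--     return new_arr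
-- ===== SOURCE B (Python) =====
-- def _merge_rev(rev):
--     # single pairing scan over the reversed compacted row: no zero-marking, no second filter pass
--     res = []
--     k = 0
--     n = len(rev)
--     while k < n:
--         if k + 1 < n and rev[k] == rev[k + 1]:
--             res.append(2 * rev[k])
--             k += 2
--         else:
--             res.append(rev[k])
--             k += 1
--     return res
--
-- def process_R(arr):
--     out = []
--     for row in arr:
--         if row:
--             merged = _merge_rev([v for v in reversed(row) if v != 0])[::-1]
--             out.append([0] * (4 - len(merged)) + merged)
--     return out
-- ===== Notes on version B (the rewrite author's own statement) =====
-- stated objective: simpler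
-- what changed: A marks merges in place (double right, zero left) and re-filters the row a second time; B does one right-to-left pairing scan over the reversed compacted row, appending the merged value and skipping two positions, so the marking pass and second zero-filter disappear.
import Mathlib
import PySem

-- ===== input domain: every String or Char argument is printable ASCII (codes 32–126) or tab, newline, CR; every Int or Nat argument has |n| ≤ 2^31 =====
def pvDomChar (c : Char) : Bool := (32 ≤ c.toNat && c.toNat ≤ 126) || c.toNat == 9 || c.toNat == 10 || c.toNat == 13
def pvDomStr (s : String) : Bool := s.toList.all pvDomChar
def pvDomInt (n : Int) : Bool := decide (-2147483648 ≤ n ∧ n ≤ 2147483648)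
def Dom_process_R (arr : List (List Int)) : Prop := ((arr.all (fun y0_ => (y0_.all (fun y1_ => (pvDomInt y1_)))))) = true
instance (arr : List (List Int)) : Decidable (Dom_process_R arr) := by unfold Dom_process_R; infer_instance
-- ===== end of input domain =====

-- B replaces A's mark-then-refilter merge (double right, zero left, filter again) by one
-- right-to-left pairing scan over the reversed compacted row; objective: simpler. No mutation issues.

-- ===== PORT A =====
def delZero (row : List Int) : List Int := row.filter (fun i => i != 0)

-- one iteration of A's marking loop body (indices produced by range are always in range, so pyGetD/pySetD are exact)
def aStep (l : List Int) (i : Int) : List Int :=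
  if PySem.List.pyGetD l i 0 == PySem.List.pyGetD l (i - 1) 0 then
    PySem.List.pySetD (PySem.List.pySetD l i (2 * PySem.List.pyGetD l i 0)) (i - 1) 0
  else l

def process_R (arr : List (List Int)) : List (List Int) :=
  arr.foldl (fun new_arr row =>
    let new_row := delZero row
    if row.length ≠ 0 then
      let new_row := (PySem.List.pyRange ((new_row.length : Int) - 1) 0 (-1)).foldl aStep new_row
      let new_row := delZero new_row
      -- [0]*(4-len): Python gives [] for a negative count, as does Nat subtraction here
      new_arr ++ [List.replicate (4 - new_row.length) 0 ++ new_row]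
    else new_arr) []

-- ===== PORT B =====
-- B's while loop: scan rev from index k, pairing equal neighbours (in-range indices; getD is exact)
def mergeLoop (rev : List Int) (k : Nat) (res : List Int) : List Int :=
  if k < rev.length then
    if k + 1 < rev.length ∧ rev.getD k 0 == rev.getD (k + 1) 0 then
      mergeLoop rev (k + 2) (res ++ [2 * rev.getD k 0])
    else
      mergeLoop rev (k + 1) (res ++ [rev.getD k 0])
  else res
termination_by rev.length - k

def process_R_alt (arr : List (List Int)) : List (List Int) :=
  arr.foldl (fun out row =>
    if row ≠ [] then
      let merged := (mergeLoop (row.reverse.filter (fun v => v != 0)) 0 []).reverse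
      out ++ [List.replicate (4 - merged.length) 0 ++ merged]
    else out) []

-- ===== PRECONDITION & SPEC =====
def Spec_process_R (arr : List (List Int)) (out : List (List Int)) : Prop := out = process_R_alt arr
instance (arr : List (List Int)) (out : List (List Int)) : Decidable (Spec_process_R arr out) := by unfold Spec_process_R; infer_instance

-- ===== CLAIM (what is proved, stated in full; the proofs are below) =====
def Claim_equal_process_R : Prop := ∀ (arr : List (List Int)), Dom_process_R arr → Spec_process_R arr (process_R arr)

-- ===== LEMMAS AND PROOFS =====

-- recursive characterisation of B's while loop
def mergeRev : List Int → List Int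
  | a :: b :: t => if a == b then 2 * a :: mergeRev t else a :: mergeRev (b :: t)
  | [a] => [a]
  | [] => []

-- functional model of A's marking loop, read from the right end (list argument reversed)
def gmark : List Int → List Int
  | a :: b :: t => if a == b then 2 * a :: gmark (0 :: t) else a :: gmark (b :: t)
  | l => l
termination_by l => l.length

lemma length_aStep (l : List Int) (i : Int) : (aStep l i).length = l.length := by
  unfold aStep; split <;> simp [PySem.List.length_pySetD]

lemma mergeLoop_eq (rev : List Int) (k : Nat) (res : List Int) :
    mergeLoop rev k res = res ++ mergeRev (rev.drop k) := by
  fun_induction mergeLoop rev k res with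
  | case1 k res hk hpair ih =>
    obtain ⟨hk1, heq⟩ := hpair
    simp [List.getD_eq_getElem?_getD, List.getElem?_eq_getElem hk, List.getElem?_eq_getElem hk1] at heq
    rw [ih, List.drop_eq_getElem_cons hk, List.drop_eq_getElem_cons hk1]
    simp [mergeRev, heq, List.getD_eq_getElem?_getD, List.getElem?_eq_getElem hk]
  | case2 k res hk hpair ih =>
    rw [ih, List.drop_eq_getElem_cons hk]
    by_cases hk1 : k + 1 < rev.length
    · have hne : ¬ rev[k] = rev[k+1] := by
        intro h
        exact hpair ⟨hk1, by simp [List.getD_eq_getElem?_getD, List.getElem?_eq_getElem hk,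
          List.getElem?_eq_getElem hk1, h]⟩
      rw [List.drop_eq_getElem_cons hk1]
      simp [mergeRev, List.getElem?_eq_getElem hk, hne]
    · have hnil : rev.drop (k+1) = [] := List.drop_eq_nil_of_le (by omega)
      simp [hnil, mergeRev, List.getElem?_eq_getElem hk]
  | case3 k res hk =>
    have hnil : rev.drop k = [] := List.drop_eq_nil_of_le (by omega)
    simp [hnil, mergeRev]

lemma aStep_append (xs : List Int) (y : Int) (i : Int) (h0 : 0 < i) (h1 : i < (xs.length : Int)) :
    aStep (xs ++ [y]) i = aStep xs i ++ [y] := by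
  have hget : ∀ (j : Int), 0 ≤ j → j.toNat < xs.length →
      PySem.List.pyGetD (xs ++ [y]) j 0 = PySem.List.pyGetD xs j 0 := by
    intro j hj hjl
    rw [PySem.List.pyGetD_eq_getElem (xs ++ [y]) 0 hj (by simp; omega),
        PySem.List.pyGetD_eq_getElem xs 0 hj (by omega)]
    simp [hjl]
  have hset : ∀ (l : List Int) (j : Int) (v : Int), 0 ≤ j → j.toNat < l.length →
      PySem.List.pySetD (l ++ [y]) j v = PySem.List.pySetD l j v ++ [y] := by
    intro l j v hj hjl
    rw [PySem.List.pySetD_of_nonneg _ _ hj, PySem.List.pySetD_of_nonneg _ _ hj]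
    simp [hjl]
  have hti : i.toNat < xs.length := by omega
  have htim : (i - 1).toNat < xs.length := by omega
  unfold aStep
  rw [hget i (by omega) hti, hget (i - 1) (by omega) htim]
  split
  · rw [hset xs i _ (by omega) hti,
        hset (PySem.List.pySetD xs i _) (i - 1) _ (by omega)
          (by rw [PySem.List.pySetD_of_nonneg _ _ (by omega : (0:Int) ≤ i)]; simpa using htim)]
  · rfl

lemma foldl_aStep_append (r : List Int) (xs : List Int) (y : Int)
    (h : ∀ i ∈ r, 0 < i ∧ i < (xs.length : Int)) :
    r.foldl aStep (xs ++ [y]) = r.foldl aStep xs ++ [y] := by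
  induction r generalizing xs with
  | nil => rfl
  | cons i r ih =>
    have hi := h i (by simp)
    simp only [List.foldl_cons]
    rw [aStep_append xs y i hi.1 hi.2, ih (aStep xs i)]
    intro j hj
    have := h j (by simp [hj])
    rwa [length_aStep]

-- A's marking loop computes gmark of the reversed list
lemma aloop_eq (n : Nat) (r : List Int) (hn : r.length ≤ n) :
    (PySem.List.pyRange ((r.length : Int) - 1) 0 (-1)).foldl aStep r.reverse = (gmark r).reverse := by
  induction n generalizing r with
  | zero =>
    have : r = [] := List.eq_nil_of_length_eq_zero (by omega)
    subst this
    simp [gmark, PySem.List.pyRange_neg_one_eq_nil (by omega : (-1:Int) ≤ 0)]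
  | succ n ih =>
    match r with
    | [] => simp [gmark, PySem.List.pyRange_neg_one_eq_nil (by omega : (-1:Int) ≤ 0)]
    | [a] => simp [gmark, PySem.List.pyRange_neg_one_eq_nil (by omega : (0:Int) ≤ 0)]
    | a :: b :: t =>
      have hlen : ((a :: b :: t).length : Int) - 1 = ((t.reverse ++ [b]).length : Int) := by
        simp
      have hrev : (a :: b :: t).reverse = (t.reverse ++ [b]) ++ [a] := by simp
      set xs : List Int := t.reverse ++ [b] with hxs
      have hxl : xs.length = t.length + 1 := by simp [hxs]
      have hga : PySem.List.pyGetD (xs ++ [a]) (xs.length : Int) 0 = a := by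
        rw [PySem.List.pyGetD_eq_getElem (xs ++ [a]) 0 (by omega) (by simp)]
        simp
      have hgb : PySem.List.pyGetD (xs ++ [a]) ((xs.length : Int) - 1) 0 = b := by
        have hL : (xs.length : Int) - 1 = ((t.length : Nat) : Int) := by simp [hxl]
        rw [hL, PySem.List.pyGetD_natCast]
        simp [hxs]
      have hstep : aStep (xs ++ [a]) (xs.length : Int) =
          if a == b then (t.reverse ++ [0]) ++ [2 * a] else xs ++ [a] := by
        unfold aStep
        rw [hga, hgb]
        split
        · rw [PySem.List.pySetD_of_nonneg _ _ (by omega), PySem.List.pySetD_of_nonneg _ _ (by omega)]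
          have h2 : ((xs.length : Int)).toNat = xs.length := by omega
          have h3 : ((xs.length : Int) - 1).toNat = t.reverse.length := by simp [hxl]
          rw [h2, h3, List.set_append_right _ _ (le_refl _)]
          simp only [Nat.sub_self, List.set_cons_zero]
          have h4 : t.reverse.length < (xs ++ [2 * a]).length := by simp [hxl]
          rw [List.set_append_left _ _ (by simp [hxl]), hxs,
              List.set_append_right _ _ (le_refl _)]
          simp
        · rfl
      have hmem : ∀ i ∈ PySem.List.pyRange ((t.length : Int)) 0 (-1), 0 < i ∧ i < ((t.length + 1 : Nat) : Int) := by
        intro i hi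
        rw [PySem.List.mem_pyRange_neg_one] at hi
        omega
      rw [hrev, hlen, PySem.List.pyRange_neg_one_cons (by omega), List.foldl_cons, hstep]
      have hL1 : (xs.length : Int) - 1 = ((t.length : Nat) : Int) := by omega
      by_cases hab : a = b
      · rw [if_pos (by simpa using hab), hL1]
        rw [foldl_aStep_append _ _ _ (by intro i hi; have := hmem i hi; constructor; exact this.1; simpa using this.2)]
        have ih0 := ih (0 :: t) (by simpa using Nat.le_of_succ_le_succ (by simpa using hn))
        simp only [List.length_cons, List.reverse_cons] at ih0
        have : ((t.length + 1 : Nat) : Int) - 1 = ((t.length : Nat) : Int) := by omega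
        rw [this] at ih0
        rw [ih0]
        have hg : gmark (a :: b :: t) = 2 * a :: gmark (0 :: t) := by
          rw [gmark]; simp [hab]
        rw [hg]
        simp
      · rw [if_neg (by simpa using hab), hL1]
        rw [foldl_aStep_append _ _ _ (by intro i hi; have := hmem i hi; constructor; exact this.1; simp [hxl]; simpa using this.2)]
        have ih0 := ih (b :: t) (by simpa using Nat.le_of_succ_le_succ (by simpa using hn))
        simp only [List.length_cons, List.reverse_cons] at ih0
        have : ((t.length + 1 : Nat) : Int) - 1 = ((t.length : Nat) : Int) := by omega
        rw [this] at ih0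
        rw [ih0]
        have hg : gmark (a :: b :: t) = a :: gmark (b :: t) := by
          rw [gmark]; simp [hab]
        rw [hg]
        simp

-- filtering gmark's zero marks yields the one-pass merge
lemma filter_gmark (n : Nat) (r : List Int) (hn : r.length ≤ n)
    (hr : ∀ x ∈ r.drop 1, x ≠ 0) :
    (gmark r).filter (fun i => i != 0) = mergeRev (r.filter (fun i => i != 0)) := by
  induction n generalizing r with
  | zero =>
    have : r = [] := List.eq_nil_of_length_eq_zero (by omega)
    subst this
    simp [gmark, mergeRev]
  | succ n ih =>
    match r with
    | [] => simp [gmark, mergeRev]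
    | [a] =>
      by_cases ha : a = 0
      · simp [gmark, mergeRev, ha]
      · simp [gmark, mergeRev, ha]
    | a :: b :: t =>
      have hb : b ≠ 0 := hr b (by simp)
      have ht : ∀ x ∈ t, x ≠ 0 := fun x hx => hr x (by simp [hx])
      have hft : t.filter (fun i => i != 0) = t :=
        List.filter_eq_self.mpr (fun x hx => by simpa using ht x hx)
      have hlt : (a :: b :: t).length ≤ n + 1 := hn
      by_cases hab : a = b
      · have ha : a ≠ 0 := hab ▸ hb
        have hg : gmark (a :: b :: t) = 2 * a :: gmark (0 :: t) := by
          rw [gmark]; simp [hab]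
        have ihp := ih (0 :: t) (by simp at hlt ⊢; omega) (by intro x hx; simp at hx; exact ht x hx)
        rw [hg]
        have hfz : (0 :: t).filter (fun i => i != 0) = t := by simp [hft]
        rw [hfz] at ihp
        have h2a : (2 * a != 0) = true := by simp [ha]
        simp only [List.filter_cons, h2a, if_pos]
        rw [ihp]
        simp only [show (a != 0) = true by simp [ha],
          show (b != 0) = true by simp [hb], if_pos, hft]
        rw [mergeRev]
        simp [hab]
      · have hg : gmark (a :: b :: t) = a :: gmark (b :: t) := by
          rw [gmark]; simp [hab]
        have ihp := ih (b :: t) (by simp at hlt ⊢; omega) (by intro x hx; simp at hx; exact ht x hx)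
        have hfb : (b :: t).filter (fun i => i != 0) = b :: t := by
          simp [hb, hft]
        rw [hfb] at ihp
        rw [hg]
        by_cases ha : a = 0
        · simp only [List.filter_cons, ha]
          simp only [show ((0:Int) != 0) = false by simp]
          rw [ihp]
          simp [hb, hft]
        · simp only [List.filter_cons, show (a != 0) = true by simp [ha]]
          simp only [if_pos]
          rw [ihp]
          simp only [show (b != 0) = true by simp [hb], if_pos, hft]
          rw [mergeRev]
          simp [hab]

-- the merged row computed A's way (mark, then re-filter) equals B's one-pass merge
lemma row_merge (row : List Int) :
    delZero ((PySem.List.pyRange (((delZero row).length : Int) - 1) 0 (-1)).foldl aStep (delZero row))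
      = (mergeLoop (row.reverse.filter (fun v => v != 0)) 0 []).reverse := by
  have hcnz : ∀ x ∈ delZero row, x ≠ 0 := by
    intro x hx
    unfold delZero at hx
    simpa using (List.of_mem_filter hx)
  set c := delZero row with hc
  have h1 : (PySem.List.pyRange ((c.length : Int) - 1) 0 (-1)).foldl aStep c
      = (gmark c.reverse).reverse := by
    have := aloop_eq c.reverse.length c.reverse (le_refl _)
    simpa using this
  rw [h1]
  show List.filter (fun i => i != 0) (gmark c.reverse).reverse = _
  rw [← List.reverse_reverse (gmark c.reverse), List.filter_reverse, List.reverse_reverse]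
  rw [filter_gmark c.reverse.length c.reverse (le_refl _)
    (by intro x hx; exact hcnz x (by simpa using List.mem_of_mem_drop hx))]
  have h2 : c.reverse.filter (fun i => i != 0) = c.reverse :=
    List.filter_eq_self.mpr (fun x hx => by simpa using hcnz x (by simpa using hx))
  rw [h2]
  have h3 : row.reverse.filter (fun v => v != 0) = c.reverse := by
    rw [List.filter_reverse]; rfl
  rw [h3, mergeLoop_eq]
  simp

-- ===== VERDICT (by name: the statement is the Claim_ definition above) =====
theorem process_R_spec : Claim_equal_process_R := by
  unfold Claim_equal_process_R Spec_process_R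
  intro arr _
  unfold process_R process_R_alt
  apply List.foldl_ext
  intro acc row _
  by_cases h : row = []
  · subst h; simp
  · have hlen : row.length ≠ 0 := by simpa using h
    simp only [h, hlen, if_pos, ne_eq, not_false_iff]
    rw [row_merge row]
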